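-- pv_equiv track=rewrite | github.com/LVXCAS/ATLAS-Presidential-AI-Challenge | scripts/DAILY_PERFORMANCE_REPORT.py | categorize_trades_by_system
-- ===== SOURCE A (Python) =====
-- from typing import Dict, List
--
-- def categorize_trades_by_system(trades: List[Dict]) -> Dict:
--     """Categorize trades by trading system (Forex vs Options)"""
--
--     forex_trades = []
--     options_trades = []
--     stock_trades = []
--
--     for trade in trades:
--         symbol = trade['symbol']
--
--         # Forex pairs contain underscore (EUR_USD)
--         if '_' in symbol:
--             forex_trades.append(trade)
--         # Options have specific format with dates
--         elif len(symbol) > 6 and any(char.isdigit() for char in symbol):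
--             options_trades.append(trade)
--         else:
--             stock_trades.append(trade)
--
--     return {
--         'forex': forex_trades,
--         'options': options_trades,
--         'stocks': stock_trades
--     }
-- ===== SOURCE B (Python) =====
-- def categorize_trades_by_system(trades):
--     """Categorize trades by trading system (Forex vs Options)"""
--
--     def is_forex(trade):
--         return '_' in trade['symbol']
--
--     def is_option(trade):
--         s = trade['symbol']
--         return '_' not in s and len(s) > 6 and any(c.isdigit() for c in s)
--
--     return {
--         'forex': [t for t in trades if is_forex(t)],
--         'options': [t for t in trades if is_option(t)],
--         'stocks': [t for t in trades if not is_forex(t) and not is_option(t)],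
--     }
-- ===== Notes on version B (the rewrite author's own statement) =====
-- stated objective: alternative
-- what changed: Replaces the single three-way accumulator loop with three independent list comprehensions over trades, one per bucket, each with a mutually-exclusive predicate on the symbol.
import Mathlib
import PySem

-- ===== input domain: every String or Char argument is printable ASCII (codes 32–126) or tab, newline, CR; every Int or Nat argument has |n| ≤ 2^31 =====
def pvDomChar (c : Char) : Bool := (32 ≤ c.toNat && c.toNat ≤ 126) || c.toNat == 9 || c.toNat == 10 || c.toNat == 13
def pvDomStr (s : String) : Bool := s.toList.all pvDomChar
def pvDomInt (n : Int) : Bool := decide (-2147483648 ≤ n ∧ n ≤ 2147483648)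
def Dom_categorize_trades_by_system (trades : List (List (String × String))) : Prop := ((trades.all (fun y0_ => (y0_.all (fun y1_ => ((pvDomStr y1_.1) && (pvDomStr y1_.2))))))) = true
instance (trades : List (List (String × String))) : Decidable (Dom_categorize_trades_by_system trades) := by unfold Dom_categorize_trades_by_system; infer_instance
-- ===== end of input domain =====

-- B replaces A's single three-way accumulator loop by three independent filters
-- (one per bucket) with mutually exclusive predicates; same cost, different decomposition.

-- ===== PORT A =====
-- trade['symbol']  (Pre_ guarantees the key is present; the "" default is never used inside Pre_)
def pvSymA (t : List (String × String)) : String := (PySem.Dict.mk t).getD "symbol" ""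

-- the loop over trades, carrying the three accumulator lists
def pvLoopA (ts : List (List (String × String)))
    (f o s : List (List (String × String))) :
    List (String × List (List (String × String))) :=
  match ts with
  | [] => [("forex", f), ("options", o), ("stocks", s)]
  | t :: rest =>
    let symbol := pvSymA t
    if PySem.Str.isIn "_" symbol then
      pvLoopA rest (f ++ [t]) o s
    else if decide (6 < PySem.Str.len symbol) && symbol.toList.any PySem.Chars.isdigit then
      pvLoopA rest f (o ++ [t]) s
    else
      pvLoopA rest f o (s ++ [t])

def categorize_trades_by_system (trades : List (List (String × String))) :
    List (String × List (List (String × String))) :=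
  pvLoopA trades [] [] []

-- ===== PORT B =====
def pvSymB (t : List (String × String)) : String := (PySem.Dict.mk t).getD "symbol" ""

def pvIsForexB (t : List (String × String)) : Bool :=
  PySem.Str.isIn "_" (pvSymB t)

def pvIsOptionB (t : List (String × String)) : Bool :=
  !PySem.Str.isIn "_" (pvSymB t)
    && decide (6 < PySem.Str.len (pvSymB t))
    && (pvSymB t).toList.any PySem.Chars.isdigit

def categorize_trades_by_system_alt (trades : List (List (String × String))) :
    List (String × List (List (String × String))) :=
  [("forex", trades.filter pvIsForexB),
   ("options", trades.filter pvIsOptionB),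
   ("stocks", trades.filter (fun t => !pvIsForexB t && !pvIsOptionB t))]

-- ===== PRECONDITION & SPEC =====
-- Pre_ excludes exactly the trades without a 'symbol' key, on which Python's trade['symbol'] raises KeyError.
def Pre_categorize_trades_by_system (trades : List (List (String × String))) : Prop :=
  (trades.all (fun t => (PySem.Dict.mk t).contains "symbol")) = true
instance (trades : List (List (String × String))) : Decidable (Pre_categorize_trades_by_system trades) := by unfold Pre_categorize_trades_by_system; infer_instance

def pvWitness_categorize_trades_by_system : (List (List (String × String))) :=
  [[("symbol", "EUR_USD")], [("symbol", "AAPL240119C")], [("symbol", "AAPL")]]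

def Spec_categorize_trades_by_system (trades : List (List (String × String))) (out : List (String × List (List (String × String)))) : Prop := out = categorize_trades_by_system_alt trades
instance (trades : List (List (String × String))) (out : List (String × List (List (String × String)))) : Decidable (Spec_categorize_trades_by_system trades out) := by unfold Spec_categorize_trades_by_system; infer_instance

-- ===== CLAIM (what is proved, stated in full; the proofs are below) =====
def Claim_equal_categorize_trades_by_system : Prop := ∀ (trades : List (List (String × String))), Dom_categorize_trades_by_system trades → Pre_categorize_trades_by_system trades → Spec_categorize_trades_by_system trades (categorize_trades_by_system trades)

-- ===== LEMMAS AND PROOFS =====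
theorem pvLoopA_eq (ts f o s : List (List (String × String))) :
    pvLoopA ts f o s =
      [("forex", f ++ ts.filter pvIsForexB),
       ("options", o ++ ts.filter pvIsOptionB),
       ("stocks", s ++ ts.filter (fun t => !pvIsForexB t && !pvIsOptionB t))] := by
  induction ts generalizing f o s with
  | nil => simp [pvLoopA]
  | cons t rest ih =>
    rw [pvLoopA]
    have e1 : pvIsForexB t = PySem.Str.isIn "_" (pvSymA t) := rfl
    have e2 : pvIsOptionB t = (!PySem.Str.isIn "_" (pvSymA t)
        && decide (6 < PySem.Str.len (pvSymA t))
        && (pvSymA t).toList.any PySem.Chars.isdigit) := rfl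
    cases h1 : PySem.Str.isIn "_" (pvSymA t) <;>
      cases h2 : decide (6 < PySem.Str.len (pvSymA t)) <;>
        cases h3 : (pvSymA t).toList.any PySem.Chars.isdigit <;>
          simp only [h1, h2, h3, Bool.and_true, Bool.and_false, Bool.not_true,
            Bool.not_false, if_true, if_false, Bool.false_eq_true,
            ih, List.filter_cons, e1, e2] <;> simp

-- ===== VERDICT (by name: the statement is the Claim_ definition above) =====
theorem categorize_trades_by_system_spec : Claim_equal_categorize_trades_by_system := by
  intro trades _ _
  unfold Spec_categorize_trades_by_system categorize_trades_by_system categorize_trades_by_system_alt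
  simp [pvLoopA_eq]
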